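-- pv_equiv track=rewrite | github.com/pisterlabs/promptset | data/scraping-2.0/repos/naarkhoo~LiteGrave/src~utils_llm.py | exclude_section_and_after
-- ===== SOURCE A (Python) =====
-- from typing import Any, Dict, List
--
-- def exclude_section_and_after(
--     pdf_sections_dict: dict, exclude_and_after_list: List[str]
-- ) -> dict:
--     """Exclude the section and after from the pdf_sections_dict."""
--     keys_to_remove = []
--     found_exclude_part = False
--     for key in pdf_sections_dict.keys():
--         if found_exclude_part:
--             keys_to_remove.append(key)
--             continue
--
--         for exclude_term in exclude_and_after_list:
--             if exclude_term == key:  # found the exact exclude term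
--                 keys_to_remove.append(key)
--                 found_exclude_part = True
--                 break
--
--     # Step 2: Remove the keys
--     for key in keys_to_remove:
--         del pdf_sections_dict[key]
--     return pdf_sections_dict
-- ===== SOURCE B (Python) =====
-- def exclude_section_and_after(pdf_sections_dict, exclude_and_after_list):
--     """Exclude the section and after from the pdf_sections_dict."""
--     keys = list(pdf_sections_dict.keys())
--     positions = [keys.index(term) for term in exclude_and_after_list if term in keys]
--     if positions:
--         for key in keys[min(positions):]:
--             del pdf_sections_dict[key]
--     return pdf_sections_dict
-- ===== Notes on version B (the rewrite author's own statement) =====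
-- stated objective: alternative
-- what changed: B loops over the exclude terms instead of scanning the dict keys with a found-flag: it collects keys.index(term) for each exclude term present, takes the minimum position as the cut point, and deletes keys[cut:] from the dict in place.
import Mathlib
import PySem

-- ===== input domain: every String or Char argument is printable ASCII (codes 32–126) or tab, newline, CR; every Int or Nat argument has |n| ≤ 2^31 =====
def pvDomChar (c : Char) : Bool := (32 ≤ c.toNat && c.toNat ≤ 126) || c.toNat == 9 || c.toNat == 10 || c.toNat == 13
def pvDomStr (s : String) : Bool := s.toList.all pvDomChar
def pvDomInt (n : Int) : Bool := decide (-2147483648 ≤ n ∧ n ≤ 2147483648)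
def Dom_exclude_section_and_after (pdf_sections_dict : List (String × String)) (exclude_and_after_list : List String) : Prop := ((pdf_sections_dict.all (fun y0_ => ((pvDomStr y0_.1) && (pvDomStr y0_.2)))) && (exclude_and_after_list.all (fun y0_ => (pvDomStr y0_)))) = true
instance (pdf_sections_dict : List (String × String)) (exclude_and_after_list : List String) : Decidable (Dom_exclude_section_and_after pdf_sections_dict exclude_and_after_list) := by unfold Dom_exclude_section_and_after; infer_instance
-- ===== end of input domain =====

-- B replaces A's flag-carrying scan of the dict keys by a loop over the exclude terms (min of their
-- first positions = cut point); both Pythons mutate the dict in place — the proved equivalence is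
-- about the returned items.

-- ===== PORT A =====
-- inner 'for exclude_term in …: if exclude_term == key: … break' = membership test, ported as List.contains
def scanStep (excl : List String) (st : List String × Bool) (key : String) : List String × Bool :=
  if st.2 then (st.1 ++ [key], st.2)
  else if excl.contains key then (st.1 ++ [key], true)
  else st

def exclude_section_and_after (pdf_sections_dict : List (String × String)) (exclude_and_after_list : List String) : List (String × String) :=
  let d := PySem.Dict.mk pdf_sections_dict
  let r := (PySem.Dict.keys d).foldl (scanStep exclude_and_after_list) ([], false)
  (r.1.foldl (fun dd k => PySem.Dict.erase dd k) d).items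

-- ===== PORT B =====
def exclude_section_and_after_alt (pdf_sections_dict : List (String × String)) (exclude_and_after_list : List String) : List (String × String) :=
  let d := PySem.Dict.mk pdf_sections_dict
  let keys := PySem.Dict.keys d
  let positions := exclude_and_after_list.filterMap (fun term => PySem.List.index? keys term)
  match PySem.List.min? positions (fun p => p) with
  | none => d.items
  | some cut => ((PySem.List.slice keys (some (cut : Int)) none).foldl (fun dd k => PySem.Dict.erase dd k) d).items

-- ===== PRECONDITION & SPEC =====
def Spec_exclude_section_and_after (pdf_sections_dict : List (String × String)) (exclude_and_after_list : List String) (out : List (String × String)) : Prop := out = exclude_section_and_after_alt pdf_sections_dict exclude_and_after_list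
instance (pdf_sections_dict : List (String × String)) (exclude_and_after_list : List String) (out : List (String × String)) : Decidable (Spec_exclude_section_and_after pdf_sections_dict exclude_and_after_list out) := by unfold Spec_exclude_section_and_after; infer_instance

-- ===== CLAIM (what is proved, stated in full; the proofs are below) =====
def Claim_equal_exclude_section_and_after : Prop := ∀ (pdf_sections_dict : List (String × String)) (exclude_and_after_list : List String), Dom_exclude_section_and_after pdf_sections_dict exclude_and_after_list → Spec_exclude_section_and_after pdf_sections_dict exclude_and_after_list (exclude_section_and_after pdf_sections_dict exclude_and_after_list)

-- ===== LEMMAS AND PROOFS =====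

-- A's scan once the flag is set: every remaining key is appended.
lemma scan_true (excl : List String) : ∀ (K acc : List String),
    K.foldl (scanStep excl) (acc, true) = (acc ++ K, true) := by
  intro K
  induction K with
  | nil => intro acc; simp
  | cons k K ih =>
    intro acc
    rw [List.foldl_cons]
    have hs : scanStep excl (acc, true) k = (acc ++ [k], true) := by simp [scanStep]
    rw [hs, ih]
    simp

-- A's scan from a clear flag collects exactly the keys from the first excluded one onward.
lemma scan_false (excl : List String) : ∀ (K acc : List String),
    (K.foldl (scanStep excl) (acc, false)).1
      = acc ++ K.drop (K.findIdx (fun k => excl.contains k)) := by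
  intro K
  induction K with
  | nil => intro acc; simp
  | cons k K ih =>
    intro acc
    rw [List.foldl_cons]
    by_cases h : excl.contains k
    · have hs : scanStep excl (acc, false) k = (acc ++ [k], true) := by
        simp [scanStep, List.contains_iff_mem.mp h]
      rw [hs, scan_true]
      simp only [List.findIdx_cons, h, cond_true, List.drop_zero]
      simp
    · have hs : scanStep excl (acc, false) k = (acc, false) := by
        have h' : k ∉ excl := fun hm => h (List.contains_iff_mem.mpr hm)
        simp [scanStep, h']
      rw [hs, ih]
      simp only [List.findIdx_cons, h, cond_false, List.drop_succ_cons]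

-- every position B collects lies at or after A's first hit
lemma findIdx_le_of_pos (excl K : List String) {t : String} {j : Nat}
    (ht : t ∈ excl) (hj : PySem.List.index? K t = some j) :
    K.findIdx (fun k => excl.contains k) ≤ j := by
  obtain ⟨hjlt, hKj, -⟩ := PySem.List.getElem_of_index?_eq_some hj
  by_contra hlt
  have h2 : excl.contains (K[j]'hjlt) = false :=
    List.not_of_lt_findIdx (p := fun k => excl.contains k) (by omega)
  rw [hKj] at h2
  have h3 := List.contains_iff_mem.mpr ht
  rw [h2] at h3
  exact absurd h3 (by simp)

-- A's first hit is itself one of B's positions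
lemma findIdx_mem_pos (excl K : List String)
    (hlt : K.findIdx (fun k => excl.contains k) < K.length) :
    (K.findIdx (fun k => excl.contains k))
      ∈ excl.filterMap (fun term => PySem.List.index? K term) := by
  have hc : excl.contains (K[K.findIdx (fun k => excl.contains k)]'hlt) = true := by
    have := List.findIdx_getElem (w := hlt)
    simpa using this
  have htmem : (K[K.findIdx (fun k => excl.contains k)]'hlt) ∈ excl :=
    List.contains_iff_mem.mp hc
  have hKmem : (K[K.findIdx (fun k => excl.contains k)]'hlt) ∈ K := List.getElem_mem hlt
  obtain ⟨j, hj⟩ := Option.isSome_iff_exists.mp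
    ((PySem.List.index?_isSome_iff _ _).mpr hKmem)
  obtain ⟨hjlt, hKj, hmin⟩ := PySem.List.getElem_of_index?_eq_some hj
  have h1 := findIdx_le_of_pos excl K htmem hj
  have h2 : ¬ (K.findIdx (fun k => excl.contains k) < j) := fun hcon => hmin _ hcon rfl
  have hji : j = K.findIdx (fun k => excl.contains k) := by omega
  exact List.mem_filterMap.mpr ⟨_, htmem, hji ▸ hj⟩

lemma pos_min (excl K : List String)
    (hlt : K.findIdx (fun k => excl.contains k) < K.length) :
    PySem.List.min? (excl.filterMap (fun term => PySem.List.index? K term)) (fun p => p)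
      = some (K.findIdx (fun k => excl.contains k)) := by
  have hmem := findIdx_mem_pos excl K hlt
  cases hm : PySem.List.min? (excl.filterMap (fun term => PySem.List.index? K term)) (fun p => p) with
  | none =>
    rw [PySem.List.min?_eq_none_iff] at hm
    rw [hm] at hmem
    exact absurd hmem (List.not_mem_nil)
  | some m =>
    have hmle : m ≤ K.findIdx (fun k => excl.contains k) :=
      PySem.List.min?_isMin hm _ hmem
    have hile : K.findIdx (fun k => excl.contains k) ≤ m := by
      rcases List.mem_filterMap.mp (PySem.List.min?_mem hm) with ⟨t, ht, hjt⟩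
      exact findIdx_le_of_pos excl K ht hjt
    have : m = K.findIdx (fun k => excl.contains k) := by omega
    rw [this]

lemma pos_none (excl K : List String)
    (hlt : ¬ K.findIdx (fun k => excl.contains k) < K.length) :
    PySem.List.min? (excl.filterMap (fun term => PySem.List.index? K term)) (fun p => p) = none := by
  have hnil : excl.filterMap (fun term => PySem.List.index? K term) = [] := by
    apply List.filterMap_eq_nil_iff.mpr
    intro t ht
    apply (PySem.List.index?_eq_none_iff K t).mpr
    intro htK
    have : K.findIdx (fun k => excl.contains k) < K.length :=
      List.findIdx_lt_length.mpr ⟨t, htK, List.contains_iff_mem.mpr ht⟩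
    exact hlt this
  rw [hnil]
  exact (PySem.List.min?_eq_none_iff _ _).mpr rfl

-- ===== VERDICT (by name: the statement is the Claim_ definition above) =====
theorem exclude_section_and_after_spec : Claim_equal_exclude_section_and_after := by
  intro pdf excl _
  unfold Spec_exclude_section_and_after
  simp only [exclude_section_and_after, exclude_section_and_after_alt]
  by_cases hlt : (PySem.Dict.keys (PySem.Dict.mk pdf)).findIdx (fun k => excl.contains k)
      < (PySem.Dict.keys (PySem.Dict.mk pdf)).length
  · rw [pos_min excl _ hlt, scan_false excl _ []]
    simp [PySem.List.slice_from_natCast]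
  · rw [pos_none excl _ hlt, scan_false excl _ []]
    have hEq : (PySem.Dict.keys (PySem.Dict.mk pdf)).findIdx (fun k => excl.contains k)
        = (PySem.Dict.keys (PySem.Dict.mk pdf)).length := by
      have := List.findIdx_le_length (p := fun k => excl.contains k)
        (xs := PySem.Dict.keys (PySem.Dict.mk pdf))
      omega
    rw [List.nil_append, hEq, List.drop_length]
    simp
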